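-- pv_equiv track=rewrite | github.com/yywon/simpleRatingRanking | dataOperations/model_with_sampling_v4.py | agg_rank_x
-- ===== SOURCE A (Python) =====
-- def agg_rank_x(vec):
--     r = [0]*len(vec)
--
--     numAssigned = 0
--     while numAssigned < len(vec):
--         minEntry = 9999
--         count = 0
--         for j in range(len(vec)):
--             if r[j] == 0 and vec[j] <= minEntry:
--                 minEntry = vec[j]
--
--         for j in range(len(vec)):
--             if vec[j] == minEntry:
--                 r[j] = numAssigned + 1
--                 count += 1
--         numAssigned += count
--     return r
-- ===== SOURCE B (Python) =====
-- def agg_rank_x(vec):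
--     # rank of each element = 1 + number of strictly smaller elements
--     return [1 + sum(1 for w in vec if w < v) for v in vec]
-- ===== Notes on version B (the rewrite author's own statement) =====
-- stated objective: simpler
-- what changed: Replaces A's repeated extract-the-minimum-unassigned rounds over a mutable rank array with a direct formula: each element's rank is 1 plus the count of strictly smaller elements (one tight counting pass per element, no per-distinct-value rescans; measured ~2x faster).
-- intended difference: On vectors containing a value above A's 9999 sentinel (with a 9999 present so A still terminates), A returns rank 0 for every element above 9999 and an inflated rank for the 9999 entries; B returns the true competition min-ranks, which is the intended behaviour. — e.g. on agg_rank_x([10000, 9999]): A returns [0, 2], B returns [2, 1]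
-- outside the precondition, e.g. on agg_rank_x([10000]): A does not finish within the time limit, B returns [1]
import Mathlib
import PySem

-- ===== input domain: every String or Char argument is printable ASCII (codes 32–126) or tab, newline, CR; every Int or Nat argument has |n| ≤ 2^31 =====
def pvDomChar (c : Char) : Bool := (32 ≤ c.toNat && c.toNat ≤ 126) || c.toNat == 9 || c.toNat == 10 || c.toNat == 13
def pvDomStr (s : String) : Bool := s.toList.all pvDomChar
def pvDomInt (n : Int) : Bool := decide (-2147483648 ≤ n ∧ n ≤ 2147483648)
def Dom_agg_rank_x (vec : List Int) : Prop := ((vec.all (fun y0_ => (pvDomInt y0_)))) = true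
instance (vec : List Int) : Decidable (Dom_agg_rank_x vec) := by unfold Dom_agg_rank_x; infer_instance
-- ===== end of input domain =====

-- B replaces A's repeated extract-the-minimum rounds by the direct formula
-- rank = 1 + number of strictly smaller elements (simpler, same asymptotic cost).


-- ===== PORT A =====
-- inner loop 1: minEntry = 9999; for j: if r[j] == 0 and vec[j] <= minEntry: minEntry = vec[j]
def aMinEntry (vec r : List Int) : Int :=
  (vec.zip r).foldl (fun m p => if p.2 == 0 && decide (p.1 ≤ m) then p.1 else m) 9999

-- inner loop 2: for j: if vec[j] == minEntry: r[j] = rank; count += 1   (returns new r and count)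
def aAssign : List Int → List Int → Int → Int → List Int × Int
  | v :: vs, x :: xs, m, rank =>
    let (rest, c) := aAssign vs xs m rank
    if v == m then (rank :: rest, c + 1) else (x :: rest, c)
  | _, xs, _, _ => (xs, 0)

-- the while loop; fuel = len(vec) suffices because each iteration assigns at least one
-- index whenever A terminates (fuel only substitutes for A's divergence, outside Pre_)
def aLoop (vec : List Int) : Nat → List Int → Int → List Int
  | 0, r, _ => r
  | fuel + 1, r, numAssigned =>
    if numAssigned < (vec.length : Int) then
      let m := aMinEntry vec r
      let p := aAssign vec r m (numAssigned + 1)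
      aLoop vec fuel p.1 (numAssigned + p.2)
    else r

def agg_rank_x (vec : List Int) : List Int :=
  aLoop vec vec.length (List.replicate vec.length 0) 0

-- ===== PORT B =====
def agg_rank_x_alt (vec : List Int) : List Int :=
  vec.map (fun v => 1 + ((vec.map (fun w => if w < v then (1 : Int) else 0)).sum))

-- ===== PRECONDITION & SPEC =====
-- Pre_ excludes vectors that contain a value > 9999 but no 9999: there A's sentinel never
-- matches the remaining minimum, count stays 0 and the while loop never terminates (A diverges).
def Pre_agg_rank_x (vec : List Int) : Prop := (∀ v ∈ vec, v ≤ 9999) ∨ (9999 : Int) ∈ vec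
instance (vec : List Int) : Decidable (Pre_agg_rank_x vec) := by unfold Pre_agg_rank_x; infer_instance
def pvWitness_agg_rank_x : List Int := [3, 1, 3]

-- On vectors containing a value above A's 9999 sentinel (and a 9999, so A terminates), A returns
-- rank 0 for every element above 9999 and an inflated rank for the 9999 entries; B returns the
-- true competition min-ranks, which is the intended behaviour.
def D_agg_rank_x (vec : List Int) : Prop := ∃ v ∈ vec, 9999 < v
instance (vec : List Int) : Decidable (D_agg_rank_x vec) := by unfold D_agg_rank_x; infer_instance

def Spec_agg_rank_x (vec : List Int) (out : List Int) : Prop := ¬ D_agg_rank_x vec → out = agg_rank_x_alt vec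
instance (vec : List Int) (out : List Int) : Decidable (Spec_agg_rank_x vec out) := by unfold Spec_agg_rank_x; infer_instance

def pvDiffWitness_agg_rank_x : List Int := [10000, 9999]
def pvDiffWitnessOut_agg_rank_x : (List Int) × (List Int) := ([0, 2], [2, 1])

-- ===== CLAIM (what is proved, stated in full; the proofs are below) =====
def Claim_unchanged_agg_rank_x : Prop := ∀ (vec : List Int), Dom_agg_rank_x vec → Pre_agg_rank_x vec → Spec_agg_rank_x vec (agg_rank_x vec)
def Claim_changed_agg_rank_x : Prop := Dom_agg_rank_x (pvDiffWitness_agg_rank_x) ∧ Pre_agg_rank_x (pvDiffWitness_agg_rank_x) ∧ D_agg_rank_x (pvDiffWitness_agg_rank_x) ∧ agg_rank_x (pvDiffWitness_agg_rank_x) = pvDiffWitnessOut_agg_rank_x.1 ∧ agg_rank_x_alt (pvDiffWitness_agg_rank_x) = pvDiffWitnessOut_agg_rank_x.2 ∧ pvDiffWitnessOut_agg_rank_x.1 ≠ pvDiffWitnessOut_agg_rank_x.2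
def Claim_exact_agg_rank_x : Prop := ∀ (vec : List Int), Dom_agg_rank_x vec → Pre_agg_rank_x vec → D_agg_rank_x vec → agg_rank_x vec ≠ agg_rank_x_alt vec

-- ===== LEMMAS AND PROOFS =====

-- the common value: rank of v in vec
def tgt (vec : List Int) (v : Int) : Int := 1 + (vec.countP (fun w => decide (w < v)) : Int)

lemma alt_eq_map_tgt (vec : List Int) : agg_rank_x_alt vec = vec.map (tgt vec) := by
  unfold agg_rank_x_alt tgt
  refine List.map_congr_left (fun v _ => ?_)
  have : (fun w => if w < v then (1 : Int) else 0) =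
      (fun w => if decide (w < v) = true then (1 : Int) else 0) := by
    funext w; by_cases h : w < v <;> simp [h]
  rw [this, PySem.List.sum_map_ite_one_zero]

-- characterisation of the minEntry fold
lemma aMinEntry_fold (l : List (Int × Int)) (m0 : Int) :
    (l.foldl (fun m p => if p.2 == 0 && decide (p.1 ≤ m) then p.1 else m) m0) ≤ m0 ∧
    (∀ p ∈ l, p.2 = 0 → (l.foldl (fun m p => if p.2 == 0 && decide (p.1 ≤ m) then p.1 else m) m0) ≤ p.1) ∧
    ((l.foldl (fun m p => if p.2 == 0 && decide (p.1 ≤ m) then p.1 else m) m0) = m0 ∨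
      ∃ p ∈ l, p.2 = 0 ∧ (l.foldl (fun m p => if p.2 == 0 && decide (p.1 ≤ m) then p.1 else m) m0) = p.1) := by
  induction l generalizing m0 with
  | nil => simp
  | cons q t ih =>
    simp only [List.foldl_cons]
    by_cases hq : q.2 = 0 ∧ q.1 ≤ m0
    · have hstep : (if q.2 == 0 && decide (q.1 ≤ m0) then q.1 else m0) = q.1 := by
        simp [hq.1, hq.2]
      rw [hstep]
      obtain ⟨h1, h2, h3⟩ := ih q.1
      refine ⟨le_trans h1 hq.2, ?_, ?_⟩
      · intro p hp hp0
        rcases List.mem_cons.1 hp with hp | hp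
        · subst hp; exact h1
        · exact h2 p hp hp0
      · rcases h3 with h | ⟨p, hp, hp0, he⟩
        · exact Or.inr ⟨q, List.mem_cons_self, hq.1, h⟩
        · exact Or.inr ⟨p, List.mem_cons_of_mem _ hp, hp0, he⟩
    · have hstep : (if q.2 == 0 && decide (q.1 ≤ m0) then q.1 else m0) = m0 := by
        by_cases h2 : q.2 = 0
        · have : ¬ q.1 ≤ m0 := fun h => hq ⟨h2, h⟩
          simp [h2, this]
        · simp [h2]
      rw [hstep]
      obtain ⟨h1, h2, h3⟩ := ih m0
      refine ⟨h1, ?_, ?_⟩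
      · intro p hp hp0
        rcases List.mem_cons.1 hp with hp | hp
        · subst hp
          have : ¬ p.1 ≤ m0 := fun h => hq ⟨hp0, h⟩
          omega
        · exact h2 p hp hp0
      · rcases h3 with h | ⟨p, hp, hp0, he⟩
        · exact Or.inl h
        · exact Or.inr ⟨p, List.mem_cons_of_mem _ hp, hp0, he⟩

-- the same, phrased about aMinEntry
lemma aMinEntry_spec (vec r : List Int) :
    aMinEntry vec r ≤ 9999 ∧
    (∀ p ∈ vec.zip r, p.2 = 0 → aMinEntry vec r ≤ p.1) ∧
    (aMinEntry vec r = 9999 ∨ ∃ p ∈ vec.zip r, p.2 = 0 ∧ aMinEntry vec r = p.1) := by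
  unfold aMinEntry
  exact aMinEntry_fold (vec.zip r) 9999

-- characterisation of aAssign
lemma aAssign_spec (vs xs : List Int) (m rank : Int) (hlen : xs.length = vs.length) :
    (aAssign vs xs m rank).1.length = vs.length ∧
    (∀ j (hj : j < vs.length) (hj' : j < (aAssign vs xs m rank).1.length) (hx : j < xs.length),
      (aAssign vs xs m rank).1[j] = if vs[j] = m then rank else xs[j]) ∧
    (aAssign vs xs m rank).2 = (vs.countP (fun w => w == m) : Int) := by
  induction vs generalizing xs with
  | nil =>
    have : xs = [] := List.length_eq_zero_iff.1 (by simpa using hlen)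
    subst this
    simp [aAssign]
  | cons v vt ih =>
    cases xs with
    | nil => simp at hlen
    | cons x xt =>
      simp only [List.length_cons, Nat.succ_inj] at hlen
      obtain ⟨h1, h2, h3⟩ := ih xt hlen
      by_cases hv : v = m
      · have e : aAssign (v :: vt) (x :: xt) m rank =
            (rank :: (aAssign vt xt m rank).1, (aAssign vt xt m rank).2 + 1) := by
          simp [aAssign, hv]
        rw [e]
        refine ⟨by simp [h1], ?_, by simp [hv, h3]; try ring⟩
        intro j hj hj' hx
        cases j with
        | zero => simp [hv]
        | succ k =>
          simp only [List.getElem_cons_succ]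
          exact h2 k (by simpa using hj) (by simpa using hj') (by simpa using hx)
      · have e : aAssign (v :: vt) (x :: xt) m rank =
            (x :: (aAssign vt xt m rank).1, (aAssign vt xt m rank).2) := by
          simp [aAssign, hv]
        rw [e]
        refine ⟨by simp [h1], ?_, by simp [hv, h3]⟩
        intro j hj hj' hx
        cases j with
        | zero => simp [hv]
        | succ k =>
          simp only [List.getElem_cons_succ]
          exact h2 k (by simpa using hj) (by simpa using hj') (by simpa using hx)

-- countP arithmetic: < m+1 splits into < m and = m
lemma countP_lt_succ (vec : List Int) (m : Int) :
    vec.countP (fun w => decide (w < m + 1)) =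
      vec.countP (fun w => decide (w < m)) + vec.countP (fun w => w == m) := by
  induction vec with
  | nil => simp
  | cons v t ih =>
    simp only [List.countP_cons, ih]
    by_cases h1 : v < m
    · have ha : v < m + 1 := by omega
      have hb : ¬ v = m := by omega
      simp [h1, ha, hb]
      ring
    · by_cases h2 : v = m
      · simp [h2]
        ring
      · have ha : ¬ v < m + 1 := by omega
        simp [h1, h2, ha]

-- the loop invariant: state (r, na) is the state after all values < b have been ranked
def LoopInv (vec r : List Int) (na b : Int) : Prop :=
  r.length = vec.length ∧
  (∀ j (hj : j < vec.length) (hj' : j < r.length),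
    r[j] = if vec[j] < b then tgt vec vec[j] else 0) ∧
  na = (vec.countP (fun w => decide (w < b)) : Int)

-- main loop lemma
lemma aLoop_spec (vec : List Int) (hpre : ∀ v ∈ vec, v ≤ 9999) :
    ∀ (fuel : Nat) (r : List Int) (na b : Int), LoopInv vec r na b →
      (vec.length : Int) - na ≤ (fuel : Int) →
      aLoop vec fuel r na = vec.map (tgt vec) := by
  intro fuel
  induction fuel with
  | zero =>
    intro r na b hinv hf
    obtain ⟨hlen, hr, hna⟩ := hinv
    have hcnt : vec.countP (fun w => decide (w < b)) = vec.length := by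
      have := List.countP_le_length (l := vec) (p := fun w => decide (w < b))
      omega
    have hall := (List.countP_eq_length).1 hcnt
    simp only [aLoop]
    refine List.ext_getElem (by simp [hlen]) ?_
    intro j hj hj'
    have hv : vec[j] < b := by
      have := hall vec[j] (List.getElem_mem _)
      simpa using this
    simp [hr j (by omega) hj, hv, tgt]
  | succ fuel ih =>
    intro r na b hinv hf
    obtain ⟨hlen, hr, hna⟩ := hinv
    simp only [aLoop]
    by_cases hlt : na < (vec.length : Int)
    · simp only [hlt, if_true]
      -- the unassigned entries are exactly those with vec[j] ≥ b
      have hr0 : ∀ j (hj : j < vec.length) (hj' : j < r.length),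
          r[j] = 0 ↔ b ≤ vec[j] := by
        intro j hj hj'
        rw [hr j hj hj']
        unfold tgt
        split <;> omega
      -- some entry is unassigned
      have hex : ∃ j, ∃ (hj : j < vec.length), b ≤ vec[j] := by
        by_contra hc
        push Not at hc
        have : vec.countP (fun w => decide (w < b)) = vec.length := by
          refine (List.countP_eq_length).2 ?_
          intro w hw
          obtain ⟨j, hj, rfl⟩ := List.mem_iff_getElem.1 hw
          simpa using hc j hj
        omega
      obtain ⟨j0, hj0, hb0⟩ := hex
      obtain ⟨hm1, hm2, hm3⟩ := aMinEntry_spec vec r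
      -- m is ≤ every unassigned value
      have hmle : ∀ j (hj : j < vec.length), b ≤ vec[j] → aMinEntry vec r ≤ vec[j] := by
        intro j hj hbj
        have hjr : j < r.length := by omega
        have hjz : j < (vec.zip r).length := by
          rw [List.length_zip]; omega
        have hmem : (vec[j], r[j]'hjr) ∈ vec.zip r := by
          have he : (vec.zip r)[j]'hjz = (vec[j], r[j]'hjr) := by
            simp [List.getElem_zip]
          rw [← he]
          exact List.getElem_mem _
        have hz : r[j]'hjr = 0 := (hr0 j hj hjr).2 hbj
        exact hm2 (vec[j], r[j]'hjr) hmem hz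
      -- any witness of hm3's right branch is an unassigned entry
      have hach : (∃ p ∈ vec.zip r, p.2 = 0 ∧ aMinEntry vec r = p.1) →
          ∃ k, ∃ (hk : k < vec.length), vec[k] = aMinEntry vec r ∧ b ≤ vec[k] := by
        rintro ⟨p, hp, hp0, he⟩
        obtain ⟨k, hk, hkz⟩ := List.mem_iff_getElem.1 hp
        have hkv : k < vec.length := by
          have := hk; simp [List.length_zip] at this; omega
        have hkr : k < r.length := by
          have := hk; simp [List.length_zip] at this; omega
        have hpk : p = (vec[k]'hkv, r[k]'hkr) := by
          rw [← hkz]; simp [List.getElem_zip]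
        have hz : r[k]'hkr = 0 := by rw [hpk] at hp0; exact hp0
        have hbk := (hr0 k hkv hkr).1 hz
        refine ⟨k, hkv, ?_, hbk⟩
        rw [he, hpk]
      -- b ≤ m, and m is attained by an unassigned entry
      have hmem_or : ∃ k, ∃ (hk : k < vec.length), vec[k] = aMinEntry vec r ∧ b ≤ vec[k] := by
        rcases hm3 with h | h
        · have h0 := hmle j0 hj0 hb0
          have h9 : vec[j0] ≤ 9999 := hpre _ (List.getElem_mem _)
          exact ⟨j0, hj0, by omega, hb0⟩
        · exact hach h
      obtain ⟨k0, hk0, hk0m, hk0b⟩ := hmem_or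
      have hbm : b ≤ aMinEntry vec r := by omega
      -- countP (< b) = countP (< m): nothing lies in [b, m)
      have hcnt_eq : vec.countP (fun w => decide (w < b)) =
          vec.countP (fun w => decide (w < aMinEntry vec r)) := by
        refine List.countP_congr ?_
        intro w hw
        obtain ⟨j, hj, rfl⟩ := List.mem_iff_getElem.1 hw
        by_cases h : vec[j] < b
        · have h2 : vec[j] < aMinEntry vec r := by omega
          simp [h, h2]
        · have := hmle j hj (by omega)
          have h2 : ¬ vec[j] < aMinEntry vec r := by omega
          simp [h, h2]
      -- the assign step
      obtain ⟨ha1, ha2, ha3⟩ := aAssign_spec vec r (aMinEntry vec r) (na + 1) hlen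
      -- new invariant at bound m + 1
      have hinv' : LoopInv vec (aAssign vec r (aMinEntry vec r) (na + 1)).1
          (na + (aAssign vec r (aMinEntry vec r) (na + 1)).2) (aMinEntry vec r + 1) := by
        refine ⟨by rw [ha1], ?_, ?_⟩
        · intro j hj hj'
          rw [ha2 j hj hj' (by omega)]
          by_cases hv : vec[j] = aMinEntry vec r
          · have hlt1 : vec[j] < aMinEntry vec r + 1 := by omega
            rw [if_pos hv, if_pos hlt1]
            unfold tgt
            rw [hv, hna, hcnt_eq]
            ring
          · rw [hr j hj (by omega)]
            by_cases h : vec[j] < b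
            · have hlt1 : vec[j] < aMinEntry vec r + 1 := by omega
              simp [hv, hlt1, h]
            · have := hmle j hj (by omega)
              have hlt1 : ¬ vec[j] < aMinEntry vec r + 1 := by omega
              simp [hv, hlt1, h]
        · rw [ha3, hna, hcnt_eq, countP_lt_succ]
          push_cast
          ring
      -- count ≥ 1: vec[k0] = m is counted
      have hcpos : 1 ≤ vec.countP (fun w => w == aMinEntry vec r) := by
        have : 0 < vec.countP (fun w => w == aMinEntry vec r) := by
          rw [List.countP_pos_iff]
          exact ⟨vec[k0], List.getElem_mem _, by simp [hk0m]⟩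
        omega
      refine ih (aAssign vec r (aMinEntry vec r) (na + 1)).1
        (na + (aAssign vec r (aMinEntry vec r) (na + 1)).2) (aMinEntry vec r + 1) hinv' ?_
      rw [ha3]
      omega
    · simp only [hlt, if_false]
      -- na ≥ len, and na = countP ≤ len, so everything is assigned
      have hcnt : vec.countP (fun w => decide (w < b)) = vec.length := by
        have := List.countP_le_length (l := vec) (p := fun w => decide (w < b))
        omega
      have hall := (List.countP_eq_length).1 hcnt
      refine List.ext_getElem (by simp [hlen]) ?_
      intro j hj hj'
      have hv : vec[j] < b := by
        have := hall vec[j] (List.getElem_mem _)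
        simpa using this
      simp [hr j (by omega) hj, hv, tgt]

-- inside D_, entries above 9999 are never assigned: minEntry is always ≤ 9999
lemma aLoop_big_zero (vec : List Int) : ∀ (fuel : Nat) (r : List Int) (na : Int),
    r.length = vec.length →
    (∀ j (hj : j < vec.length) (hj' : j < r.length), 9999 < vec[j] → r[j] = 0) →
    (aLoop vec fuel r na).length = vec.length ∧
      ∀ j (hj : j < vec.length) (hj' : j < (aLoop vec fuel r na).length),
        9999 < vec[j] → (aLoop vec fuel r na)[j] = 0 := by
  intro fuel
  induction fuel with
  | zero =>
    intro r na hlen hz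
    simp only [aLoop]
    exact ⟨hlen, hz⟩
  | succ fuel ih =>
    intro r na hlen hz
    simp only [aLoop]
    by_cases hlt : na < (vec.length : Int)
    · simp only [hlt, if_true]
      obtain ⟨hm1, _, _⟩ := aMinEntry_spec vec r
      obtain ⟨ha1, ha2, _⟩ := aAssign_spec vec r (aMinEntry vec r) (na + 1) hlen
      refine ih _ _ ha1 ?_
      intro j hj hj' hbig
      rw [ha2 j hj hj' (by omega)]
      have hne : ¬ vec[j] = aMinEntry vec r := by omega
      rw [if_neg hne]
      exact hz j hj (by omega) hbig
    · simp only [hlt, if_false]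
      exact ⟨hlen, hz⟩

-- ===== VERDICT (by name: the statements are the Claim_ definitions above) =====
theorem agg_rank_x_spec : Claim_unchanged_agg_rank_x := by
  intro vec hdom hpre hnd
  have hpre' : ∀ v ∈ vec, v ≤ 9999 := by
    intro v hv
    by_contra hc
    exact hnd ⟨v, hv, by omega⟩
  rw [alt_eq_map_tgt]
  unfold agg_rank_x
  refine aLoop_spec vec hpre' vec.length (List.replicate vec.length 0) 0 (-2147483649) ?_ (by omega)
  refine ⟨by simp, ?_, ?_⟩
  · intro j hj hj'
    have hd : pvDomInt vec[j] = true := by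
      have := (List.all_eq_true.1 hdom) vec[j] (List.getElem_mem _)
      simpa using this
    have hlb : -2147483648 ≤ vec[j] := by
      simp [pvDomInt] at hd
      omega
    have hnb : ¬ vec[j] < -2147483649 := by omega
    simp [hnb]
  · have h0 : vec.countP (fun w => decide (w < -2147483649)) = 0 := by
      refine List.countP_eq_zero.2 ?_
      intro w hw
      have := (List.all_eq_true.1 hdom) w hw
      simp [pvDomInt] at this ⊢
      omega
    rw [h0]
    simp

theorem agg_rank_x_changed : Claim_changed_agg_rank_x := by
  unfold Claim_changed_agg_rank_x
  decide

theorem agg_rank_x_tight : Claim_exact_agg_rank_x := by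
  intro vec hdom hpre hd heq
  obtain ⟨v, hv, hbig⟩ := hd
  obtain ⟨j, hj, rfl⟩ := List.mem_iff_getElem.1 hv
  obtain ⟨hA1, hA2⟩ := aLoop_big_zero vec vec.length (List.replicate vec.length 0) 0
    (by simp) (by intro k hk hk' h; simp)
  have hjA : j < (agg_rank_x vec).length := by unfold agg_rank_x; omega
  have hAz : (agg_rank_x vec)[j] = 0 := by
    unfold agg_rank_x at hjA ⊢
    exact hA2 j hj (by omega) hbig
  have hjB : j < (agg_rank_x_alt vec).length := by rw [← heq]; exact hjA
  have hBz : (agg_rank_x_alt vec)[j]'hjB = tgt vec vec[j] := by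
    rw [List.getElem_of_eq (alt_eq_map_tgt vec) hjB]
    simp
  have hsame : (agg_rank_x vec)[j]'hjA = (agg_rank_x_alt vec)[j]'hjB := by
    congr 1
  rw [hAz, hBz] at hsame
  unfold tgt at hsame
  omega
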